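-- pv_equiv track=rewrite | github.com/sunnythakr/Python_basic | LIST_03/29.py | segregateElements
-- ===== SOURCE A (Python) =====
-- def segregateElements(arr, n):
--     # Your code goes here
--     arr1 = []
--     for i in arr:
--         if i>0:
--             arr1.append(i)
--
--     for j in arr:
--         if j<0:
--             arr1.append(j)
--
--     for k in range(n):
--         arr[k] = arr1[k]
--
--     return arr
-- ===== SOURCE B (Python) =====
-- def segregateElements(arr, n):
--     # One stable sort: drop zeros, positives (key False) before negatives (key True),
--     # each group keeping its original order; then copy back into arr in place.
--     arr1 = sorted((x for x in arr if x != 0), key=lambda x: x < 0)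
--     for k in range(n):
--         arr[k] = arr1[k]
--     return arr
-- ===== Notes on version B (the rewrite author's own statement) =====
-- stated objective: idiomatic
-- what changed: Replaces the two explicit partition passes that build arr1 with a single stable sort of the nonzero elements keyed by sign (key=lambda x: x < 0), which puts positives before negatives each in original order.
import Mathlib
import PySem

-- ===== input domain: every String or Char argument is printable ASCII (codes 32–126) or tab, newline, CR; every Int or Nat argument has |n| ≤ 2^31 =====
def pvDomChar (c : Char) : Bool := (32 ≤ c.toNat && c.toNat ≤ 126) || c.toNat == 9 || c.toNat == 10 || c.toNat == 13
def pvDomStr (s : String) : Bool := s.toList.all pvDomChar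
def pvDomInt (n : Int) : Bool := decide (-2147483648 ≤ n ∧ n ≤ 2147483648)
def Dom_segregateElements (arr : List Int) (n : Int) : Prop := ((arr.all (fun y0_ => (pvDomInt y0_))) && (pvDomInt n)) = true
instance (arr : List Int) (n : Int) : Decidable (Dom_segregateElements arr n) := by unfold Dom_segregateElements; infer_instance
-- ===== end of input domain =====

-- B replaces A's two explicit partition passes with a single stable sort keyed by sign (idiomatic; same return value).
-- Both versions mutate arr in place identically (arr[k] = arr1[k]); the theorems are about the return value.


-- ===== PORT A =====
def segregateElements (arr : List Int) (n : Int) : List Int :=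
  -- arr1 = []; for i in arr: if i>0: arr1.append(i)
  let arr1 : List Int := arr.foldl (fun acc i => if i > 0 then acc ++ [i] else acc) []
  -- for j in arr: if j<0: arr1.append(j)
  let arr1 : List Int := arr.foldl (fun acc j => if j < 0 then acc ++ [j] else acc) arr1
  -- for k in range(n): arr[k] = arr1[k]   (arr1[k] in range under Pre_)
  (PySem.List.pyRange 0 n).foldl (fun a k => a.set k.toNat (PySem.List.pyGetD arr1 k 0)) arr

-- ===== PORT B =====
def segregateElements_alt (arr : List Int) (n : Int) : List Int :=
  -- arr1 = sorted((x for x in arr if x != 0), key=lambda x: x < 0)   (stable; False < True)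
  let arr1 : List Int :=
    PySem.List.sorted (arr.filter (fun x => decide (x ≠ 0))) (fun x => decide (x < 0))
  -- for k in range(n): arr[k] = arr1[k]
  (PySem.List.pyRange 0 n).foldl (fun a k => a.set k.toNat (PySem.List.pyGetD arr1 k 0)) arr

-- ===== PRECONDITION & SPEC =====
-- Pre_ excludes exactly the inputs where A (and B alike) raises IndexError in the copy-back
-- loop: n exceeding the length of arr or the number of nonzero elements of arr.
def Pre_segregateElements (arr : List Int) (n : Int) : Prop :=
  n ≤ (arr.length : Int) ∧ n ≤ ((arr.filter (fun x => decide (x ≠ 0))).length : Int)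
instance (arr : List Int) (n : Int) : Decidable (Pre_segregateElements arr n) := by
  unfold Pre_segregateElements; infer_instance
def pvWitness_segregateElements : List Int × Int := ([3, -1, 0, 2, -4], 4)

def Spec_segregateElements (arr : List Int) (n : Int) (out : List Int) : Prop :=
  out = segregateElements_alt arr n
instance (arr : List Int) (n : Int) (out : List Int) : Decidable (Spec_segregateElements arr n out) := by
  unfold Spec_segregateElements; infer_instance

-- ===== CLAIM (what is proved, stated in full; the proofs are below) =====
def Claim_equal_segregateElements : Prop :=
  ∀ (arr : List Int) (n : Int), Dom_segregateElements arr n →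
    Pre_segregateElements arr n → Spec_segregateElements arr n (segregateElements arr n)

-- ===== LEMMAS AND PROOFS =====

-- insertBy where x is not "before" any element of P but is "before" every element of N:
-- x lands exactly between P and N.
theorem insertBy_split (before : Int → Int → Bool) (x : Int) (P N : List Int)
    (hP : ∀ p ∈ P, before x p = false) (hN : ∀ q ∈ N, before x q = true) :
    PySem.List.insertBy before x (P ++ N) = P ++ x :: N := by
  induction P with
  | nil =>
      cases N with
      | nil => rfl
      | cons q N' => simp [PySem.List.insertBy, hN q (by simp)]
  | cons p P' ih =>
      have hp := hP p (by simp)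
      simp only [List.cons_append, PySem.List.insertBy, hp]
      simp [ih (fun p hp => hP p (by simp [hp]))]

-- The stable insertion sort with the boolean key (x < 0) splits an accumulator P ++ N
-- (P nonnegative, N negative) into (P ++ nonnegatives of xs) ++ (N ++ negatives of xs).
theorem foldl_insertBy_split (xs P N : List Int)
    (hP : ∀ p ∈ P, ¬ p < 0) (hN : ∀ q ∈ N, q < 0) :
    xs.foldl (fun acc x =>
        PySem.List.insertBy (fun a b => decide ((decide (a < 0)) < (decide (b < 0)))) x acc)
      (P ++ N)
    = (P ++ xs.filter (fun x => !decide (x < 0))) ++ (N ++ xs.filter (fun x => decide (x < 0))) := by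
  induction xs generalizing P N with
  | nil => simp
  | cons x xs ih =>
      by_cases hx : x < 0
      · have hstep : PySem.List.insertBy
            (fun a b => decide ((decide (a < 0)) < (decide (b < 0)))) x (P ++ N) = (P ++ N) ++ [x] := by
          apply PySem.List.insertBy_of_forall_not_before
          intro y _
          simp [hx]
        have := ih P (N ++ [x]) hP (by intro q hq; rcases List.mem_append.mp hq with h | h
                                       · exact hN q h
                                       · simp at h; simpa [h] using hx)
        simp only [List.foldl_cons, hstep, List.append_assoc] at this ⊢
        simp [this, hx]
      · have hstep : PySem.List.insertBy
            (fun a b => decide ((decide (a < 0)) < (decide (b < 0)))) x (P ++ N) = (P ++ [x]) ++ N := by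
          have := insertBy_split (fun a b => decide ((decide (a < 0)) < (decide (b < 0)))) x P N
            (fun p hp => by simp [hx, hP p hp]) (fun q hq => by simp [hx, hN q hq])
          simpa using this
        have := ih (P ++ [x]) N (by intro p hp; rcases List.mem_append.mp hp with h | h
                                    · exact hP p h
                                    · simp at h; simpa [h] using hx) hN
        simp only [List.foldl_cons, hstep, List.append_assoc, List.singleton_append] at this ⊢
        simp [this, hx]

-- B's arr1 equals A's arr1: stable sort by sign of the nonzeros = positives then negatives.
theorem arr1_eq (arr : List Int) :
    PySem.List.sorted (arr.filter (fun x => decide (x ≠ 0))) (fun x => decide (x < 0))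
    = arr.foldl (fun acc j => if j < 0 then acc ++ [j] else acc)
        (arr.foldl (fun acc i => if i > 0 then acc ++ [i] else acc) []) := by
  rw [PySem.List.sorted_eq_foldl_insertBy]
  have h := foldl_insertBy_split (arr.filter (fun x => decide (x ≠ 0))) [] []
    (by simp) (by simp)
  simp only [List.nil_append] at h
  rw [h]
  have hA1 : arr.foldl (fun acc i => if i > 0 then acc ++ [i] else acc) ([] : List Int)
      = arr.filter (fun x => decide (0 < x)) := by
    have := PySem.List.foldl_append_if (fun x : Int => decide (0 < x)) id arr []
    simpa using this
  have hA2 : ∀ init : List Int,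
      arr.foldl (fun acc j => if j < 0 then acc ++ [j] else acc) init
      = init ++ arr.filter (fun x => decide (x < 0)) := by
    intro init
    have := PySem.List.foldl_append_if (fun x : Int => decide (x < 0)) id arr init
    simpa using this
  rw [hA1, hA2, List.filter_filter, List.filter_filter]
  congr 1
  · apply List.filter_congr
    intro x _
    by_cases hx : x < 0 <;> by_cases hx0 : x = 0 <;> simp [hx, hx0] <;> omega
  · apply List.filter_congr
    intro x _
    by_cases hx : x < 0 <;> simp [hx] <;> omega

-- ===== VERDICT (by name: the statement is the Claim_ definition above) =====
theorem segregateElements_spec : Claim_equal_segregateElements := by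
  intro arr n _ _
  unfold Spec_segregateElements segregateElements segregateElements_alt
  rw [arr1_eq]
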